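-- pv_equiv track=rewrite | github.com/nchen01/brain | brain-mvp/src/docforge/postprocessing/hybrid_chunking/boundary_detectors.py | estimate_position_for_word_count
-- ===== SOURCE A (Python) =====
-- def estimate_position_for_word_count(text: str, target_words: int) -> int:
--     """
--     Estimate character position for a target word count.
--
--     Args:
--         text: Text to analyze
--         target_words: Target number of words
--
--     Returns:
--         Estimated character position
--     """
--     words = text.split()
--     if target_words >= len(words):
--         return len(text)
--
--     # Count characters up to target word
--     position = 0
--     for i, word in enumerate(words[:target_words]):
--         position = text.find(word, position) + len(word)
--
--     return position
-- ===== SOURCE B (Python) =====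
-- def estimate_position_for_word_count(text: str, target_words: int) -> int:
--     """One linear state-machine scan over the characters: record each word's end
--     index as it closes, then slice that list and return the last selected end."""
--     ends = []
--     prev_space = True
--     for i, ch in enumerate(text):
--         if ch.isspace():
--             if not prev_space:
--                 ends.append(i)
--             prev_space = True
--         else:
--             prev_space = False
--     if not prev_space:
--         ends.append(len(text))
--     if target_words >= len(ends):
--         return len(text)
--     selected = ends[:target_words]
--     return selected[-1] if selected else 0
-- ===== Notes on version B (the rewrite author's own statement) =====
-- stated objective: alternative
-- what changed: Replaces split() plus a repeated text.find scan per word with a single character-level state-machine pass that records each word's end index once, then slices that list and returns the last selected end.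
import Mathlib
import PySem

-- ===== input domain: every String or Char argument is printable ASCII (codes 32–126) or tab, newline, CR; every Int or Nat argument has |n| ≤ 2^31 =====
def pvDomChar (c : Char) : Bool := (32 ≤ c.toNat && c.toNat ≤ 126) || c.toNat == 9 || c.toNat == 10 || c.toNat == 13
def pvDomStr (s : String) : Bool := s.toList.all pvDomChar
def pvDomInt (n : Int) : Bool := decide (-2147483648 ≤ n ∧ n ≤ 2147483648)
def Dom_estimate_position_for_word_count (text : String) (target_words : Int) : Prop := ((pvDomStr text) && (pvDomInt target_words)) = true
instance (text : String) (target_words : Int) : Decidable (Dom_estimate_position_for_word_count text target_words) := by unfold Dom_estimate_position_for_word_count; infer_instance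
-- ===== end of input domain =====

-- B replaces A's split()+repeated-find word walk by one character-level scan that
-- records each word's end index, then slices that list; proved equal on every input.

-- ===== PORT A =====
-- literal port of A: split, guard, then one text.find per sliced word advancing `position`
-- (the `enumerate` index `i` of A's loop is unused by A's body; the fold carries only `position`)
def estimate_position_for_word_count (text : String) (target_words : Int) : Int :=
  let words := PySem.Str.split₀ text
  if target_words ≥ (words.length : Int) then PySem.Str.len text
  else
    (PySem.List.slice words none (some target_words)).foldl
      (fun position word => PySem.Str.findFrom text word position none + PySem.Str.len word) 0

-- ===== PORT B =====
-- literal port of Source B: fold the state (ends, prev_space) over enumerate(text),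
-- close the last word after the loop, then guard, slice, and take the last selected end
-- (`selected[-1]` is PySem.List.pyGet? at -1; it is `some` exactly when `selected` is nonempty)
def estimate_position_for_word_count_alt (text : String) (target_words : Int) : Int :=
  let st := (PySem.List.enumerate text.toList).foldl
      (fun (st : List Int × Bool) ic =>
        if PySem.Chars.isspace ic.2 then (if st.2 then st.1 else st.1 ++ [ic.1], true)
        else (st.1, false)) ([], true)
  let ends := if st.2 then st.1 else st.1 ++ [PySem.Str.len text]
  if target_words ≥ (ends.length : Int) then PySem.Str.len text
  else
    let selected := PySem.List.slice ends none (some target_words)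
    if selected.isEmpty then 0 else (PySem.List.pyGet? selected (-1)).getD 0

-- ===== PRECONDITION & SPEC =====
def Spec_estimate_position_for_word_count (text : String) (target_words : Int) (out : Int) : Prop := out = estimate_position_for_word_count_alt text target_words
instance (text : String) (target_words : Int) (out : Int) : Decidable (Spec_estimate_position_for_word_count text target_words out) := by unfold Spec_estimate_position_for_word_count; infer_instance

-- ===== CLAIM (what is proved, stated in full; the proofs are below) =====
def Claim_equal_estimate_position_for_word_count : Prop := ∀ (text : String) (target_words : Int), Dom_estimate_position_for_word_count text target_words → Spec_estimate_position_for_word_count text target_words (estimate_position_for_word_count text target_words)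


-- ===== LEMMAS AND PROOFS =====

-- reference tokenizer: the words of `s` as produced by str.split()
def pvNotW (c : Char) : Bool := !PySem.Chars.isspace c

def pvToks : List Char → List (List Char)
  | [] => []
  | c :: rest =>
    if PySem.Chars.isspace c then pvToks rest
    else (c :: rest.takeWhile pvNotW) :: pvToks (rest.dropWhile pvNotW)
termination_by s => s.length
decreasing_by
  · simp
  · have := List.length_dropWhile_le pvNotW rest; simp; omega

-- end index (absolute, offset p) of each word of `s`
def pvEnds : List Char → Nat → List Nat
  | [], _ => []
  | c :: rest, p =>
    if PySem.Chars.isspace c then pvEnds rest (p + 1)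
    else (p + 1 + (rest.takeWhile pvNotW).length) ::
      pvEnds (rest.dropWhile pvNotW) (p + 1 + (rest.takeWhile pvNotW).length)
termination_by s _ => s.length
decreasing_by
  · simp
  · have := List.length_dropWhile_le pvNotW rest; simp; omega

theorem pvEnds_length (s : List Char) (p : Nat) : (pvEnds s p).length = (pvToks s).length := by
  induction s, p using pvEnds.induct with
  | case1 p => simp [pvEnds, pvToks]
  | case2 c rest p h ih => simp [pvEnds, pvToks, h, ih]
  | case3 c rest p h ih => simp [pvEnds, pvToks, h, ih]

-- split₀.go characterised by pvToks
theorem pvGo_eq (cs : List Char) : ∀ (cur : List Char) (acc : List (List Char)),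
    PySem.Chars.split₀.go cs cur acc =
      acc.reverse ++ (if cur = [] then pvToks cs
        else (cur.reverse ++ cs.takeWhile pvNotW) :: pvToks (cs.dropWhile pvNotW)) := by
  induction cs with
  | nil =>
    intro cur acc
    cases cur <;> simp [PySem.Chars.split₀.go, pvToks]
  | cons c rest ih =>
    intro cur acc
    by_cases hs : PySem.Chars.isspace c
    · cases cur with
      | nil => simp [PySem.Chars.split₀.go, hs, ih, pvToks]
      | cons d t => simp [PySem.Chars.split₀.go, hs, ih, pvToks, pvNotW]
    · cases cur with
      | nil => simp [PySem.Chars.split₀.go, hs, ih, pvToks]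
      | cons d t => simp [PySem.Chars.split₀.go, hs, ih, pvNotW]

theorem pvSplit_eq (cs : List Char) : PySem.Chars.split₀ cs = pvToks cs := by
  simpa using pvGo_eq cs [] []

-- every word is nonempty and starts with a non-space character
theorem pvToks_mem {s w : List Char} (hw : w ∈ pvToks s) :
    ∃ d t, w = d :: t ∧ PySem.Chars.isspace d = false := by
  induction s using pvToks.induct with
  | case1 => simp [pvToks] at hw
  | case2 c rest h ih => rw [pvToks, if_pos h] at hw; exact ih hw
  | case3 c rest h ih =>
    rw [pvToks, if_neg h] at hw
    rcases List.mem_cons.mp hw with h1 | h1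
    · exact ⟨c, rest.takeWhile pvNotW, h1, by simpa using h⟩
    · exact ih h1

-- find = the stated first occurrence
theorem pvFind_eq (s tok : List Char) (m : Nat) (hpref : tok <+: s.drop m)
    (hmin : ∀ i, i < m → ¬ tok <+: s.drop i) : PySem.Chars.find s tok = (m : Int) := by
  have hinf : tok <:+: s := by
    obtain ⟨r, hr⟩ := hpref
    exact ⟨s.take m, r, by rw [List.append_assoc, hr, List.take_append_drop]⟩
  have h0 : 0 ≤ PySem.Chars.find s tok := (PySem.Chars.find_nonneg_iff s tok).mpr hinf
  obtain ⟨h1, h2⟩ := PySem.Chars.find_spec h0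
  have hm : (PySem.Chars.find s tok).toNat = m := by
    rcases lt_trichotomy (PySem.Chars.find s tok).toNat m with h | h | h
    · exact absurd h1 (hmin _ h)
    · exact h
    · exact absurd hpref (h2 m h)
  omega

theorem pvDropSucc {cs : List Char} {p : Nat} {c : Char} {rest : List Char}
    (h : cs.drop p = c :: rest) : cs.drop (p + 1) = rest := by
  have : cs.drop (p + 1) = (cs.drop p).drop 1 := by rw [List.drop_drop]
  rw [this, h]; rfl

theorem pvDropLt {cs : List Char} {p : Nat} {c : Char} {rest : List Char}
    (h : cs.drop p = c :: rest) : p < cs.length := by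
  by_contra hp
  rw [List.drop_eq_nil_iff.mpr (by omega)] at h
  simp at h

-- A's fold over the first k words lands on the k-th word's end index
theorem pvFoldA (cs : List Char) : ∀ (s : List Char) (p : Nat), cs.drop p = s → ∀ k : Nat,
    1 ≤ k → k ≤ (pvToks s).length →
    ((pvToks s).take k).foldl
      (fun pos w => PySem.Chars.findFrom cs w pos none + (w.length : Int)) (p : Int)
      = (((pvEnds s p).getD (k - 1) 0 : Nat) : Int) := by
  intro s p
  induction s, p using pvEnds.induct with
  | case1 p =>
    intro _ k hk1 hk2
    simp [pvToks] at hk2; omega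
  | case2 c rest p hs ih =>
    intro hdrop k hk1 hk2
    rw [pvToks, if_pos hs] at hk2 ⊢
    rw [pvEnds, if_pos hs]
    have hrest : cs.drop (p + 1) = rest := pvDropSucc hdrop
    have hlt : p < cs.length := pvDropLt hdrop
    have hne : pvToks rest ≠ [] := by intro h; rw [h] at hk2; simp at hk2; omega
    obtain ⟨w, ws, hws⟩ := List.exists_cons_of_ne_nil hne
    obtain ⟨d, t, hw, hd⟩ := pvToks_mem (s := rest) (by rw [hws]; exact List.mem_cons_self)
    -- first find is insensitive to the leading space at position p
    have hstep : PySem.Chars.findFrom cs w (p : Int) none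
        = PySem.Chars.findFrom cs w ((p + 1 : Nat) : Int) none := by
      rw [PySem.Chars.findFrom_natCast cs w p (by omega),
          PySem.Chars.findFrom_natCast cs w (p + 1) (by omega), hrest, hdrop]
      by_cases hF : PySem.Chars.find rest w = -1
      · have hni : ¬ w <:+: rest := (PySem.Chars.find_eq_neg_one_iff rest w).mp hF
        have hni2 : PySem.Chars.find (c :: rest) w = -1 := by
          rw [PySem.Chars.find_eq_neg_one_iff]
          rintro ⟨u, v, huv⟩
          cases u with
          | nil =>
            simp at huv
            rw [hw] at huv
            have : d = c := by
              have := congrArg (List.head?) huv; simpa using this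
            rw [this] at hd; rw [hs] at hd; exact Bool.noConfusion hd
          | cons x u' =>
            have : u' ++ w ++ v = rest := by
              simpa using congrArg List.tail huv
            exact hni ⟨u', v, this⟩
        rw [hF, hni2]; simp
      · have h0 : 0 ≤ PySem.Chars.find rest w := by
          have := PySem.Chars.neg_one_le_find rest w; omega
        obtain ⟨h1, h2⟩ := PySem.Chars.find_spec h0
        set m := (PySem.Chars.find rest w).toNat with hm
        have hcons : PySem.Chars.find (c :: rest) w = ((m + 1 : Nat) : Int) := by
          apply pvFind_eq
          · show w <+: (c :: rest).drop (m + 1)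
            simpa using h1
          · intro i hi
            cases i with
            | zero =>
              intro hpre
              rw [hw] at hpre
              obtain ⟨hdc, -⟩ := List.cons_prefix_cons.mp (by simpa using hpre)
              rw [hdc, hs] at hd; exact Bool.noConfusion hd
            | succ j =>
              intro hpre
              exact h2 j (by omega) (by simpa using hpre)
        rw [hcons]
        rw [if_neg (by omega)]
        rw [if_neg hF]
        omega
    have hfold : ∀ (l : List (List Char)) (a b : Int), a = b →
        l.foldl (fun pos w => PySem.Chars.findFrom cs w pos none + (w.length : Int)) a
        = l.foldl (fun pos w => PySem.Chars.findFrom cs w pos none + (w.length : Int)) b := by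
      intro l a b h; rw [h]
    calc ((pvToks rest).take k).foldl
          (fun pos w => PySem.Chars.findFrom cs w pos none + (w.length : Int)) (p : Int)
        = ((pvToks rest).take k).foldl
          (fun pos w => PySem.Chars.findFrom cs w pos none + (w.length : Int)) ((p + 1 : Nat) : Int) := by
          rw [hws]
          rw [List.take_cons (by omega)]
          rw [List.foldl_cons, List.foldl_cons, hstep]
      _ = _ := ih hrest k hk1 hk2
  | case3 c rest p hs ih =>
    intro hdrop k hk1 hk2
    rw [pvToks, if_neg hs] at hk2 ⊢
    rw [pvEnds, if_neg hs]
    set tk := rest.takeWhile pvNotW with htk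
    set rp := rest.dropWhile pvNotW with hrp
    set e := p + 1 + tk.length with he
    have hlt : p < cs.length := pvDropLt hdrop
    have htokdec : cs.drop p = (c :: tk) ++ rp := by
      rw [hdrop]; simp [htk, hrp, List.takeWhile_append_dropWhile]
    have hfind : PySem.Chars.find (cs.drop p) (c :: tk) = ((0 : Nat) : Int) := by
      apply pvFind_eq
      · show (c :: tk) <+: (cs.drop p).drop 0
        rw [List.drop_zero, htokdec]
        exact ⟨rp, rfl⟩
      · intro i hi; omega
    have hstep : PySem.Chars.findFrom cs (c :: tk) (p : Int) none + ((c :: tk).length : Int)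
        = ((e : Nat) : Int) := by
      rw [PySem.Chars.findFrom_natCast cs (c :: tk) p (by omega), hfind]
      rw [if_neg (by omega)]
      simp [he]; ring
    have hdropE : cs.drop e = rp := by
      have h1 : cs.drop e = (cs.drop p).drop (tk.length + 1) := by
        rw [List.drop_drop]; congr 1; omega
      rw [h1, htokdec]
      exact List.drop_left' (by simp)
    rw [List.take_cons (by omega), List.foldl_cons, hstep]
    cases k with
    | zero => omega
    | succ k' =>
      cases k' with
      | zero =>
        simp
      | succ k'' =>
        have := ih hdropE (k'' + 1) (by omega) (by simpa using hk2)
        simpa using this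

-- B's scan step and finalisation, and: the scan computes exactly the word-end list pvEnds
def pvStep (st : List Int × Bool) (ic : Int × Char) : List Int × Bool :=
  if PySem.Chars.isspace ic.2 then (if st.2 then st.1 else st.1 ++ [ic.1], true)
  else (st.1, false)

def pvFin (L : Nat) (st : List Int × Bool) : List Int :=
  if st.2 then st.1 else st.1 ++ [(L : Int)]

theorem pvScan (L : Nat) (s : List Char) : ∀ (p : Nat) (acc : List Int), p + s.length = L →
    (pvFin L ((PySem.List.enumerate s (p : Int)).foldl pvStep (acc, true))
      = acc ++ (pvEnds s p).map Int.ofNat)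
    ∧ (pvFin L ((PySem.List.enumerate s (p : Int)).foldl pvStep (acc, false))
      = acc ++ ((p + (s.takeWhile pvNotW).length : Nat) : Int) ::
          (pvEnds (s.dropWhile pvNotW) (p + (s.takeWhile pvNotW).length)).map Int.ofNat) := by
  induction s with
  | nil =>
    intro p acc hp
    constructor
    · simp [PySem.List.enumerate, pvEnds, pvFin]
    · have hL : p = L := by simpa using hp
      subst hL
      simp [PySem.List.enumerate, pvEnds, pvFin]
  | cons c rest ih =>
    intro p acc hp
    have hcast : (p : Int) + 1 = ((p + 1 : Nat) : Int) := by omega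
    have hp' : (p + 1) + rest.length = L := by simp at hp; omega
    constructor
    · by_cases hs : PySem.Chars.isspace c
      · simp only [PySem.List.enumerate, List.foldl_cons]
        rw [show pvStep (acc, true) ((p : Int), c) = (acc, true) from by simp [pvStep, hs]]
        rw [pvEnds, if_pos hs, hcast]
        exact (ih (p + 1) acc hp').1
      · simp only [PySem.List.enumerate, List.foldl_cons]
        rw [show pvStep (acc, true) ((p : Int), c) = (acc, false) from by simp [pvStep, hs]]
        rw [pvEnds, if_neg hs, hcast]
        rw [(ih (p + 1) acc hp').2]
        congr 2
    · by_cases hs : PySem.Chars.isspace c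
      · simp only [PySem.List.enumerate, List.foldl_cons]
        rw [show pvStep (acc, false) ((p : Int), c) = (acc ++ [(p : Int)], true) from by
          simp [pvStep, hs]]
        rw [hcast, (ih (p + 1) (acc ++ [(p : Int)]) hp').1]
        have h1 : (c :: rest).takeWhile pvNotW = [] := by simp [pvNotW, hs]
        have h2 : (c :: rest).dropWhile pvNotW = c :: rest := by simp [pvNotW, hs]
        rw [h1, h2, pvEnds, if_pos hs]
        simp
      · simp only [PySem.List.enumerate, List.foldl_cons]
        rw [show pvStep (acc, false) ((p : Int), c) = (acc, false) from by simp [pvStep, hs]]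
        rw [hcast, (ih (p + 1) acc hp').2]
        have h1 : (c :: rest).takeWhile pvNotW = c :: rest.takeWhile pvNotW := by
          simp [pvNotW, hs]
        have h2 : (c :: rest).dropWhile pvNotW = rest.dropWhile pvNotW := by simp [pvNotW, hs]
        rw [h1, h2]
        have harg : p + (c :: rest.takeWhile pvNotW).length
            = p + 1 + (rest.takeWhile pvNotW).length := by simp; omega
        rw [harg]

-- common closed description both ports are reduced to
def pvRef (cs : List Char) (t : Int) : Int :=
  if t ≥ ((pvToks cs).length : Int) then (cs.length : Int)
  else
    let k : Nat := if t < 0 then (((pvToks cs).length : Int) + t).toNat else t.toNat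
    if k = 0 then 0 else (((pvEnds cs 0).getD (k - 1) 0 : Nat) : Int)

theorem pvSlice_neg {α : Type} (xs : List α) {t : Int} (ht : t < 0) :
    PySem.List.slice xs none (some t) = xs.take (((xs.length : Int) + t).toNat) := by
  simp only [PySem.List.slice, PySem.List.clampIdx, if_pos ht]
  split_ifs with h
  · have h0 : (((xs.length : Int)) + t).toNat = 0 := by omega
    simp [h0]
  · simp

theorem pvA_eq (text : String) (t : Int) :
    estimate_position_for_word_count text t = pvRef text.toList t := by
  unfold estimate_position_for_word_count pvRef
  have hsplit : (PySem.Str.split₀ text).map String.toList = pvToks text.toList := by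
    rw [PySem.Str.split₀_map_toList, pvSplit_eq]
  have hwlen : (PySem.Str.split₀ text).length = (pvToks text.toList).length := by
    rw [← hsplit, List.length_map]
  by_cases hg : t ≥ ((pvToks text.toList).length : Int)
  · rw [if_pos (by rw [hwlen]; exact hg), if_pos hg, PySem.Str.len_eq]
  · rw [if_neg (by rw [hwlen]; exact hg), if_neg hg]
    set N := (pvToks text.toList).length with hN
    set k : Nat := if t < 0 then ((N : Int) + t).toNat else t.toNat with hk
    have hkN : k ≤ N := by
      rw [hk]; split_ifs <;> omega
    have hslice : PySem.List.slice (PySem.Str.split₀ text) none (some t)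
        = (PySem.Str.split₀ text).take k := by
      by_cases ht : t < 0
      · rw [pvSlice_neg _ ht, hwlen, hk, if_pos ht]
      · rw [PySem.List.slice_to _ (by omega), hk, if_neg ht]
    rw [hslice]
    have hfoldmap : ∀ (l : List String) (i : Int),
        l.foldl (fun position word =>
          PySem.Str.findFrom text word position none + PySem.Str.len word) i
        = (l.map String.toList).foldl (fun pos w =>
            PySem.Chars.findFrom text.toList w pos none + (w.length : Int)) i := by
      intro l i
      rw [List.foldl_map]
      simp [PySem.Str.len_eq]
    rw [hfoldmap, List.map_take, hsplit]
    by_cases hk0 : k = 0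
    · simp [hk0]
    · rw [if_neg hk0]
      have := pvFoldA text.toList text.toList 0 List.drop_zero k (by omega) hkN
      simpa using this

theorem pvAltBody (cs : List Char) (t : Int) (E : List Int)
    (hE : E = (pvEnds cs 0).map Int.ofNat) :
    (if t ≥ (E.length : Int) then (cs.length : Int)
     else
       let selected := PySem.List.slice E none (some t)
       if selected.isEmpty then 0 else (PySem.List.pyGet? selected (-1)).getD 0)
      = pvRef cs t := by
  unfold pvRef
  have hNlen : (pvEnds cs 0).length = (pvToks cs).length := pvEnds_length cs 0
  have hlen : E.length = (pvToks cs).length := by rw [hE, List.length_map, hNlen]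
  rw [hlen]
  by_cases hg : t ≥ ((pvToks cs).length : Int)
  · rw [if_pos hg, if_pos hg]
  · rw [if_neg hg, if_neg hg]
    set N := (pvToks cs).length with hN
    set k : Nat := if t < 0 then ((N : Int) + t).toNat else t.toNat with hk
    have hkN : k ≤ N := by rw [hk]; split_ifs <;> omega
    have hkE : k ≤ E.length := by rw [hlen]; exact hkN
    have hslice : PySem.List.slice E none (some t) = E.take k := by
      by_cases ht : t < 0
      · rw [pvSlice_neg _ ht, hlen, hk, if_pos ht]
      · rw [PySem.List.slice_to _ (by omega), hk, if_neg ht]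
    rw [hslice]
    by_cases hk0 : k = 0
    · simp [hk0]
    · have hEne : E.take k ≠ [] := by
        intro h
        have h1 := congrArg List.length h
        rw [List.length_take] at h1
        have h2 : min k E.length = 0 := h1
        omega
      rw [if_neg (by simpa [List.isEmpty_iff] using hEne), if_neg hk0]
      rw [PySem.List.pyGet?_neg_one]
      have hidx : k - 1 < E.length := by omega
      have hlast : (E.take k).getLast? = some E[k - 1] := by
        rw [List.getLast?_eq_getElem?]
        have hlt : (E.take k).length - 1 = k - 1 := by
          simp [List.length_take]; omega
        rw [hlt, List.getElem?_take_of_lt (by omega), List.getElem?_eq_getElem hidx]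
      rw [hlast]
      subst hE
      have hidx2 : k - 1 < (pvEnds cs 0).length := by
        rw [List.length_map] at hidx; omega
      simp only [Option.getD_some, List.getElem_map]
      rw [List.getD_eq_getElem _ _ hidx2]
      rfl

theorem pvAlt_eq (text : String) (t : Int) :
    estimate_position_for_word_count_alt text t = pvRef text.toList t := by
  unfold estimate_position_for_word_count_alt
  have hfun : (fun (st : List Int × Bool) (ic : Int × Char) =>
      if PySem.Chars.isspace ic.2 then (if st.2 then st.1 else st.1 ++ [ic.1], true)
      else (st.1, false)) = pvStep := rfl
  rw [hfun, PySem.Str.len_eq]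
  have key : (if (List.foldl pvStep ([], true) (PySem.List.enumerate text.toList)).2
        then (List.foldl pvStep ([], true) (PySem.List.enumerate text.toList)).1
        else (List.foldl pvStep ([], true) (PySem.List.enumerate text.toList)).1
          ++ [(text.toList.length : Int)])
      = (pvEnds text.toList 0).map Int.ofNat := by
    have h := (pvScan text.toList.length text.toList 0 [] (by simp)).1
    simpa [pvFin] using h
  exact pvAltBody text.toList t _ key

-- ===== VERDICT (by name: the statement is the Claim_ definition above) =====
theorem estimate_position_for_word_count_spec : Claim_equal_estimate_position_for_word_count := by
  intro text t _
  unfold Spec_estimate_position_for_word_count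
  rw [pvA_eq, pvAlt_eq]
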